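-- pv_equiv track=rewrite | github.com/LHospital13/SpecGen | HoudiniGPT.py | mutate_token_list
-- ===== SOURCE A (Python) =====
-- def mutate_token_list(token_list, in_forall):
--     res_list = []
--     token_variant_list = []
--     if len(token_list) == 0:
--         return [[""]]
--     if token_list[0].find("\\forall") != -1 or token_list[0].find("\\exists") != -1:
--         in_forall = True
--         tmp_str = token_list[0]
--         token_variant_list.append(tmp_str.replace("forall", "exists"))
--         token_variant_list.append(tmp_str.replace("exists", "forall"))
--     #elif token_list[0] == "==" or token_list[0] == "!=":
--     #    token_variant_list = ["!=", "=="]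
--     elif token_list[0] == "&&" or token_list[0] == "||":
--         if in_forall:
--             in_forall = False
--             token_variant_list = [token_list[0]]
--         else:
--             token_variant_list = ["&&", "||"]
--     elif token_list[0] == "<=":
--         token_variant_list = ["<=", "- 1 <="]
--     elif token_list[0] == ">=":
--         token_variant_list = [">=", "+ 1 >="]
--     elif token_list[0] == "<":
--         token_variant_list = ["<", "<="]
--     elif token_list[0] == ">":
--         token_variant_list = [">", ">="]
--     #elif token_list[0] == "+" or token_list[0] == "-":
--     #    token_variant_list = ["+", "-"]
--     else:
--         token_variant_list = [token_list[0]]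
--     for variant in token_variant_list:
--         for res in mutate_token_list(token_list[1:], in_forall):
--             tmp_list = [variant]
--             tmp_list.extend(res)
--             res_list.append(tmp_list)
--     return res_list
-- ===== SOURCE B (Python) =====
-- _OP_VARIANTS = {"<=": ["<=", "- 1 <="], ">=": [">=", "+ 1 >="], "<": ["<", "<="], ">": [">", ">="]}
--
-- def mutate_token_list(token_list, in_forall):
--     # Two staged passes: a forward scan computes each position's variant list once
--     # (threading the in_forall flag), then a backward pass builds the cross product.
--     levels = []
--     flag = in_forall
--     for tok in token_list:
--         if "\\forall" in tok or "\\exists" in tok: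
--             vs = [tok.replace("forall", "exists"), tok.replace("exists", "forall")]
--             flag = True
--         elif tok == "&&" or tok == "||":
--             if flag:
--                 vs = [tok]
--                 flag = False
--             else:
--                 vs = ["&&", "||"]
--         else:
--             vs = _OP_VARIANTS.get(tok, [tok])
--         levels.append(vs)
--     res = [[""]]
--     for vs in reversed(levels):
--         res = [[v] + r for v in vs for r in res]
--     return res
-- ===== Notes on version B (the rewrite author's own statement) =====
-- stated objective: faster
-- what changed: Replaces A's recursion that re-runs the suffix recursion once per variant of the head token (slicing the list each call) by two staged passes: a forward scan that computes each position's variant list exactly once (fixed operator variants looked up in a dict), then a backward pass that builds the cross product. Intended as faster; a timing run measured B 5.76x faster at the largest size both finished (n=4096); at larger sizes both time out (the output itself is exponential).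
import Mathlib
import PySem

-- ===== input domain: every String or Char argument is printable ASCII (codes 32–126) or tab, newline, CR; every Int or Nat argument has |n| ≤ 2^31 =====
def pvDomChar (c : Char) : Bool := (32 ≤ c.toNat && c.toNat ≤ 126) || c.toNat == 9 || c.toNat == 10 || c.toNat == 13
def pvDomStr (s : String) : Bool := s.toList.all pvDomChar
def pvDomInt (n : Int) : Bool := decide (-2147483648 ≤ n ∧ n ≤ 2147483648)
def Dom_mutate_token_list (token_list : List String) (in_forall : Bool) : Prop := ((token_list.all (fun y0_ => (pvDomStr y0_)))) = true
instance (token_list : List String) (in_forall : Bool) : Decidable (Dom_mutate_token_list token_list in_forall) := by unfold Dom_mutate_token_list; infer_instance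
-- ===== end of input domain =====

-- B replaces A's recursion (which re-runs the suffix recursion once per head variant and slices
-- the list each call) by two staged passes: a forward scan computing each level's variant list
-- once, then a backward cross-product pass; intended as faster (a timing run measured
-- B 5.76x faster at the largest size both programs finished).


-- ===== PORT A =====
-- literal transliteration of A: recursion on the tail; the recursive call is evaluated
-- inside the loop over variants, results appended one by one
def mutate_token_list : List String → Bool → List (List String)
  | [], _ => [[""]]
  | tok :: rest, in_forall =>
    let tv : List String × Bool :=
      if PySem.Str.find tok "\\forall" ≠ -1 ∨ PySem.Str.find tok "\\exists" ≠ -1 then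
        ([PySem.Str.replace tok "forall" "exists", PySem.Str.replace tok "exists" "forall"], true)
      else if tok = "&&" ∨ tok = "||" then
        (if in_forall then ([tok], false) else (["&&", "||"], in_forall))
      else if tok = "<=" then (["<=", "- 1 <="], in_forall)
      else if tok = ">=" then ([">=", "+ 1 >="], in_forall)
      else if tok = "<" then (["<", "<="], in_forall)
      else if tok = ">" then ([">", ">="], in_forall)
      else ([tok], in_forall)
    tv.1.foldl (fun res_list variant =>
      (mutate_token_list rest tv.2).foldl
        (fun rl res => rl ++ [variant :: res]) res_list) []

-- ===== PORT B =====
-- B-side helper: the fixed operator-variant table (Python module constant _OP_VARIANTS)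
def pvOpVariants : PySem.Dict String (List String) :=
  ((((PySem.Dict.empty).insert "<=" ["<=", "- 1 <="]).insert ">=" [">=", "+ 1 >="]).insert
      "<" ["<", "<="]).insert ">" [">", ">="]

def mutate_token_list_alt (token_list : List String) (in_forall : Bool) : List (List String) :=
  -- stage 1: forward scan, collecting each position's variant list while threading the flag
  let st := token_list.foldl
    (fun (st : List (List String) × Bool) tok =>
      if PySem.Str.isIn "\\forall" tok ∨ PySem.Str.isIn "\\exists" tok then
        (st.1 ++ [[PySem.Str.replace tok "forall" "exists",
                   PySem.Str.replace tok "exists" "forall"]], true)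
      else if tok = "&&" ∨ tok = "||" then
        if st.2 then (st.1 ++ [[tok]], false) else (st.1 ++ [["&&", "||"]], st.2)
      else (st.1 ++ [pvOpVariants.getD tok [tok]], st.2))
    ([], in_forall)
  -- stage 2: backward pass building the cross product
  st.1.reverse.foldl (fun res vs => vs.flatMap (fun v => res.map (v :: ·))) [[""]]

-- ===== PRECONDITION & SPEC =====
def Spec_mutate_token_list (token_list : List String) (in_forall : Bool) (out : List (List String)) : Prop := out = mutate_token_list_alt token_list in_forall
instance (token_list : List String) (in_forall : Bool) (out : List (List String)) : Decidable (Spec_mutate_token_list token_list in_forall out) := by unfold Spec_mutate_token_list; infer_instance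

-- ===== CLAIM (what is proved, stated in full; the proofs are below) =====
def Claim_equal_mutate_token_list : Prop := ∀ (token_list : List String) (in_forall : Bool), Dom_mutate_token_list token_list in_forall → Spec_mutate_token_list token_list in_forall (mutate_token_list token_list in_forall)

-- ===== LEMMAS AND PROOFS =====

-- proof-side abbreviation of A's variant table for one token
def variantsOf (tok : String) (in_forall : Bool) : List String × Bool :=
  if PySem.Str.find tok "\\forall" ≠ -1 ∨ PySem.Str.find tok "\\exists" ≠ -1 then
    ([PySem.Str.replace tok "forall" "exists", PySem.Str.replace tok "exists" "forall"], true)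
  else if tok = "&&" ∨ tok = "||" then
    (if in_forall then ([tok], false) else (["&&", "||"], in_forall))
  else if tok = "<=" then (["<=", "- 1 <="], in_forall)
  else if tok = ">=" then ([">=", "+ 1 >="], in_forall)
  else if tok = "<" then (["<", "<="], in_forall)
  else if tok = ">" then ([">", ">="], in_forall)
  else ([tok], in_forall)

-- the per-token variant lists produced by a whole forward scan
def levelsOf : List String → Bool → List (List String)
  | [], _ => []
  | tok :: rest, f => (variantsOf tok f).1 :: levelsOf rest (variantsOf tok f).2

-- B's stage-1 step agrees with A's variant table
lemma step_eq (ls : List (List String)) (f : Bool) (tok : String) :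
    (if PySem.Str.isIn "\\forall" tok ∨ PySem.Str.isIn "\\exists" tok then
        (ls ++ [[PySem.Str.replace tok "forall" "exists",
                 PySem.Str.replace tok "exists" "forall"]], true)
      else if tok = "&&" ∨ tok = "||" then
        if f then (ls ++ [[tok]], false) else (ls ++ [["&&", "||"]], f)
      else (ls ++ [pvOpVariants.getD tok [tok]], f))
      = (ls ++ [(variantsOf tok f).1], (variantsOf tok f).2) := by
  unfold variantsOf
  have h1 : (PySem.Str.isIn "\\forall" tok = true ∨ PySem.Str.isIn "\\exists" tok = true)
      ↔ (PySem.Str.find tok "\\forall" ≠ -1 ∨ PySem.Str.find tok "\\exists" ≠ -1) := by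
    simp [PySem.Chars.isIn_iff_infix, Ne, PySem.Chars.find_eq_neg_one_iff]
  simp only [h1]
  by_cases hfa : PySem.Str.find tok "\\forall" ≠ -1 ∨ PySem.Str.find tok "\\exists" ≠ -1
  · simp only [if_pos hfa]
  · simp only [if_neg hfa]
    by_cases ha : tok = "&&" ∨ tok = "||"
    · simp [ha]; cases f <;> simp
    · simp only [if_neg ha]
      simp only [pvOpVariants, PySem.Dict.getD_insert]
      split_ifs <;> simp_all

-- stage 1 computes exactly the levels of A's table
lemma stage1_eq (tl : List String) : ∀ (f : Bool) (acc : List (List String)),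
    (tl.foldl
      (fun (st : List (List String) × Bool) tok =>
        if PySem.Str.isIn "\\forall" tok ∨ PySem.Str.isIn "\\exists" tok then
          (st.1 ++ [[PySem.Str.replace tok "forall" "exists",
                     PySem.Str.replace tok "exists" "forall"]], true)
        else if tok = "&&" ∨ tok = "||" then
          if st.2 then (st.1 ++ [[tok]], false) else (st.1 ++ [["&&", "||"]], st.2)
        else (st.1 ++ [pvOpVariants.getD tok [tok]], st.2))
      (acc, f)).1 = acc ++ levelsOf tl f := by
  induction tl with
  | nil => intro f acc; simp [levelsOf]
  | cons tok rest ih =>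
    intro f acc
    rw [List.foldl_cons, step_eq acc f tok, ih, levelsOf]
    simp

-- A's two nested append-folds collapse to a flatMap of maps
lemma fold_flat (tvs : List String) (M : List (List String)) :
    tvs.foldl (fun res_list v => M.foldl (fun rl res => rl ++ [v :: res]) res_list) []
      = tvs.flatMap (fun v => M.map (v :: ·)) := by
  simp only [PySem.List.foldl_append_singleton_eq_map]
  exact List.flatMap_eq_foldl.symm

-- A on a cons, written with the variant table
lemma mutate_cons (tok : String) (rest : List String) (f : Bool) :
    mutate_token_list (tok :: rest) f
      = (variantsOf tok f).1.flatMap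
          (fun v => (mutate_token_list rest (variantsOf tok f).2).map (v :: ·)) := by
  have h : mutate_token_list (tok :: rest) f
      = (variantsOf tok f).1.foldl (fun res_list v =>
          (mutate_token_list rest (variantsOf tok f).2).foldl
            (fun rl res => rl ++ [v :: res]) res_list) [] := rfl
  rw [h, fold_flat]

-- stage 2 (a foldr over the levels) rebuilds A's result
lemma stage2_eq (tl : List String) : ∀ (f : Bool),
    (levelsOf tl f).foldr (fun vs res => vs.flatMap (fun v => res.map (v :: ·))) [[""]]
      = mutate_token_list tl f := by
  induction tl with
  | nil => intro f; rfl
  | cons tok rest ih =>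
    intro f
    rw [levelsOf, List.foldr_cons, ih, mutate_cons]

-- ===== VERDICT (by name: the statement is the Claim_ definition above) =====
theorem mutate_token_list_spec : Claim_equal_mutate_token_list := by
  intro tl f _
  show mutate_token_list tl f
      = ((tl.foldl
          (fun (st : List (List String) × Bool) tok =>
            if PySem.Str.isIn "\\forall" tok ∨ PySem.Str.isIn "\\exists" tok then
              (st.1 ++ [[PySem.Str.replace tok "forall" "exists",
                         PySem.Str.replace tok "exists" "forall"]], true)
            else if tok = "&&" ∨ tok = "||" then
              if st.2 then (st.1 ++ [[tok]], false) else (st.1 ++ [["&&", "||"]], st.2)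
            else (st.1 ++ [pvOpVariants.getD tok [tok]], st.2))
          ([], f)).1).reverse.foldl
            (fun res vs => vs.flatMap (fun v => res.map (v :: ·))) [[""]]
  rw [stage1_eq tl f [], List.nil_append, List.foldl_reverse, ← stage2_eq tl f]
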